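-- pv_equiv track=rewrite | github.com/aozp73/Algorithm-Baekjoon | 500-브루트 포스/사탕 게임.py | check
-- ===== SOURCE A (Python) =====
-- def check(board):
--     n = len(board)
--     ans = 1
--     for i in range(n):
--         # 각 행에서 가장 긴 연속 부분 체크
--         cnt = 1
--         for j in range(1, n):
--             if board[i][j] == board[i][j-1]:
--                 cnt += 1
--             else:
--                 cnt = 1
--             if cnt > ans:
--                 ans = cnt
--
--         # 각 열에서 가장 긴 연속 부분 체크
--         cnt = 1
--         for j in range(1, n):
--             if board[j][i] == board[j-1][i]:
--                 cnt += 1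
--             else:
--                 cnt = 1
--             if cnt > ans:
--                 ans = cnt
--     return ans
-- ===== SOURCE B (Python) =====
-- def check(board):
--     n = len(board)
--     rows = [row[:n] for row in board]
--     cols = [[board[j][i] for j in range(n)] for i in range(n)]
--     best = 1
--     for line in rows + cols:
--         # breakpoint positions where the value changes, from adjacent pairs
--         cuts = [0] + [k + 1 for k, (a, b) in enumerate(zip(line, line[1:])) if a != b] + [len(line)]
--         # longest run = largest gap between consecutive breakpoints
--         for a, b in zip(cuts, cuts[1:]):
--             if b - a > best:
--                 best = b - a
--     return best
-- ===== Notes on version B (the rewrite author's own statement) =====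
-- stated objective: alternative
-- what changed: A keeps a running counter per index that resets on each mismatch; B instead computes, for each row and each column, the list of breakpoint positions where adjacent cells differ (from enumerate over zip(line, line[1:])) and takes the answer as the largest gap between consecutive breakpoints, i.e. a staged breakpoints-then-max-gap decomposition instead of A's single-pass counter.
-- outside the precondition, e.g. on check([[]]): A returns 1, B raises IndexError
import Mathlib
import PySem

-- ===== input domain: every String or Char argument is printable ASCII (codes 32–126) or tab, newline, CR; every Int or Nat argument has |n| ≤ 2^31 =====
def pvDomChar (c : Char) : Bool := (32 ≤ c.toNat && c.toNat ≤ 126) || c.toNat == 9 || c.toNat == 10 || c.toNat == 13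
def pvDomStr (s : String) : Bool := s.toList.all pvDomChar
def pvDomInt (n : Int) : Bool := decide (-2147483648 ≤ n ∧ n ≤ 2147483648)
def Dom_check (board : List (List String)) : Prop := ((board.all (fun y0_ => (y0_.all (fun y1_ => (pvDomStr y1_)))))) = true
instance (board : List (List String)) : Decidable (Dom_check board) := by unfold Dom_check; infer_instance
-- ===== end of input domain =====

-- B replaces A's running-counter scan by a staged decomposition: per row/column line it lists the
-- breakpoint positions where adjacent cells differ and takes the largest gap between consecutive
-- breakpoints; alternative algorithm of the same cost.

-- ===== PORT A =====
def check (board : List (List String)) : Int :=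
  let n : Int := board.length
  (PySem.List.pyRange 0 n 1).foldl (fun ans i =>
    let s1 := (PySem.List.pyRange 1 n 1).foldl (fun (s : Int × Int) j =>
      let cnt : Int := if PySem.List.pyGetD (PySem.List.pyGetD board i []) j "" ==
                          PySem.List.pyGetD (PySem.List.pyGetD board i []) (j-1) ""
                       then s.1 + 1 else 1
      (cnt, if cnt > s.2 then cnt else s.2)) (1, ans)
    let s2 := (PySem.List.pyRange 1 n 1).foldl (fun (s : Int × Int) j =>
      let cnt : Int := if PySem.List.pyGetD (PySem.List.pyGetD board j []) i "" ==
                          PySem.List.pyGetD (PySem.List.pyGetD board (j-1) []) i ""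
                       then s.1 + 1 else 1
      (cnt, if cnt > s.2 then cnt else s.2)) (1, s1.2)
    s2.2) 1

-- ===== PORT B =====
def check_alt (board : List (List String)) : Int :=
  let n : Int := board.length
  let rows := board.map (fun row => PySem.List.slice row none (some n))
  let cols := (PySem.List.pyRange 0 n 1).map (fun i =>
    (PySem.List.pyRange 0 n 1).map (fun j =>
      PySem.List.pyGetD (PySem.List.pyGetD board j []) i ""))
  (rows ++ cols).foldl (fun best line =>
    let cuts : List Int :=
      0 :: ((PySem.List.enumerate (line.zip (PySem.List.slice line (some 1) none)) 0).filter
              (fun p => !(p.2.1 == p.2.2))).map (fun p => p.1 + 1)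
        ++ [(line.length : Int)]
    (cuts.zip (PySem.List.slice cuts (some 1) none)).foldl
      (fun best p => if p.2 - p.1 > best then p.2 - p.1 else best) best) 1

-- ===== PRECONDITION & SPEC =====
-- Pre_ excludes ragged boards having a row shorter than n = len(board): for n ≥ 2 A raises
-- IndexError on them; the only such excluded boards where A still returns are one-row boards whose
-- single row is empty (A returns 1 without ever indexing), degenerate non-square boards on which
-- B's column indexing raises.
def Pre_check (board : List (List String)) : Prop :=
  ∀ row ∈ board, board.length ≤ row.length
instance (board : List (List String)) : Decidable (Pre_check board) := by unfold Pre_check; infer_instance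

def pvWitness_check : List (List String) := [["a","a"],["b","a"]]

def Spec_check (board : List (List String)) (out : Int) : Prop := out = check_alt board
instance (board : List (List String)) (out : Int) : Decidable (Spec_check board out) := by unfold Spec_check; infer_instance

-- ===== CLAIM (what is proved, stated in full; the proofs are below) =====
def Claim_equal_check : Prop := ∀ (board : List (List String)), Dom_check board → Pre_check board → Spec_check board (check board)

-- ===== LEMMAS AND PROOFS =====

-- canonical longest-run value of a line (proof-side characterisation shared by both reductions)
def pvLR : List String → Int
  | [] => 0
  | x :: ys =>
    max (1 + ((ys.takeWhile (fun y => y == x)).length : Int))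
        (pvLR (ys.dropWhile (fun y => y == x)))
termination_by l => l.length
decreasing_by simp only [List.length_cons]; exact Nat.lt_succ_of_le (List.length_dropWhile_le _ _)

theorem pvLR_nonneg (l : List String) : 0 ≤ pvLR l := by
  induction l using pvLR.induct with
  | case1 => simp [pvLR]
  | case2 x ys ih => rw [pvLR]; positivity

-- one step of A's inner loops
def pvStep (prev cur : String) (s : Int × Int) : Int × Int :=
  let cnt : Int := if cur == prev then s.1 + 1 else 1
  (cnt, if cnt > s.2 then cnt else s.2)

-- structural form of A's inner loops
def pvAux (prev : String) (s : Int × Int) : List String → Int × Int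
  | [] => s
  | y :: ys => pvAux y (pvStep prev y s) ys

theorem pvIdx_aux (ys : List String) (x : String) (s : Int × Int) :
    (List.range ((x :: ys).length - 1)).foldl
      (fun s k => pvStep ((x :: ys).getD k "") ((x :: ys).getD (k+1) "") s) s
    = pvAux x s ys := by
  induction ys generalizing x s with
  | nil => rfl
  | cons y t ih =>
    have hlen : (x :: y :: t).length - 1 = t.length + 1 := by simp
    rw [hlen, List.range_succ_eq_map, List.foldl_cons, List.foldl_map]
    simp only [List.getD_cons_zero, List.getD_cons_succ, Nat.succ_eq_add_one]
    exact ih y (pvStep x y s)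

theorem pvAux_spec (ys : List String) (prev : String) (cnt ans : Int)
    (h1 : 1 ≤ cnt) (h2 : cnt ≤ ans) :
    (pvAux prev (cnt, ans) ys).2
      = max ans (max (cnt + ((ys.takeWhile (fun y => y == prev)).length : Int))
                     (pvLR (ys.dropWhile (fun y => y == prev)))) := by
  induction ys generalizing prev cnt ans with
  | nil =>
    simp only [pvAux, List.takeWhile_nil, List.dropWhile_nil, List.length_nil, Nat.cast_zero,
      add_zero, pvLR]
    omega
  | cons y t ih =>
    by_cases h : (y == prev) = true
    · have hy : y = prev := eq_of_beq h
      have hstep : pvStep prev y (cnt, ans) = (cnt + 1, if cnt + 1 > ans then cnt + 1 else ans) := by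
        simp [pvStep, h]
      rw [pvAux, hstep, hy]
      rw [ih prev (cnt+1) _ (by omega) (by split <;> omega)]
      rw [List.takeWhile_cons_of_pos (by simp), List.dropWhile_cons_of_pos (by simp)]
      have hw : (0:Int) ≤ ((t.takeWhile (fun z => z == prev)).length : Int) := by positivity
      simp only [List.length_cons, Nat.cast_add, Nat.cast_one]
      split <;> omega
    · have hstep : pvStep prev y (cnt, ans) = (1, ans) := by
        simp only [pvStep, h, if_false, Bool.false_eq_true]
        have : ¬ ((1:Int) > ans) := by omega
        simp [this]
      rw [pvAux, hstep]
      rw [ih y 1 ans (by omega) (by omega)]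
      rw [List.takeWhile_cons_of_neg (by simpa using h), List.dropWhile_cons_of_neg (by simpa using h)]
      have hLR : pvLR (y :: t) = max (1 + ((t.takeWhile (fun z => z == y)).length : Int))
          (pvLR (t.dropWhile (fun z => z == y))) := by rw [pvLR]
      rw [← hLR]
      simp only [List.length_nil, Nat.cast_zero, add_zero]
      have := pvLR_nonneg (y :: t)
      omega

theorem pvLineA (t : List String) (ans : Int) (h : 1 ≤ ans) :
    ((List.range (t.length - 1)).foldl
      (fun s k => pvStep (t.getD k "") (t.getD (k+1) "") s) (1, ans)).2 = max ans (pvLR t) := by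
  cases t with
  | nil => simp [pvLR]; omega
  | cons x ys =>
    rw [pvIdx_aux, pvAux_spec ys x 1 ans (le_refl _) h]
    conv_rhs => rw [pvLR]

-- fold congruence carrying a state invariant
theorem pvFoldl_congr_inv {α β : Type} (l : List α) (f g : β → α → β) (P : β → Prop)
    (init : β) (hinit : P init)
    (hf : ∀ b x, P b → x ∈ l → f b x = g b x ∧ P (g b x)) :
    l.foldl f init = l.foldl g init := by
  induction l generalizing init with
  | nil => rfl
  | cons x t ih =>
    have h1 := hf init x hinit (by simp)
    rw [List.foldl_cons, List.foldl_cons, h1.1]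
    exact ih (g init x) h1.2 (fun b y hb hy => hf b y hb (by simp [hy]))

theorem pvFoldMax_pull {α : Type} (l : List α) (h : α → Int) (b x : Int) :
    l.foldl (fun a y => max a (h y)) (max b x) = max (l.foldl (fun a y => max a (h y)) b) x := by
  induction l generalizing b with
  | nil => rfl
  | cons z t ih => rw [List.foldl_cons, List.foldl_cons, max_right_comm, ih]

theorem pvFoldMax_interleave {α : Type} (l : List α) (f g : α → Int) (b : Int) :
    l.foldl (fun a y => max (max a (f y)) (g y)) b
      = l.foldl (fun a y => max a (g y)) (l.foldl (fun a y => max a (f y)) b) := by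
  induction l generalizing b with
  | nil => rfl
  | cons z t ih =>
    rw [List.foldl_cons, List.foldl_cons, List.foldl_cons, ← pvFoldMax_pull, ih]

theorem pvFoldl_range_getD {α β : Type} (l : List α) (g : β → α → β) (d : α) (init : β) :
    (List.range l.length).foldl (fun b k => g b (l.getD k d)) init = l.foldl g init := by
  rw [← PySem.List.foldl_pyRange_zero_pyGetD' l d g init, PySem.List.pyRange_zero_nat, List.foldl_map]
  simp [PySem.List.pyGetD_natCast]

def pvGrid (board : List (List String)) : List (List String) :=
  board.map (fun row => row.take board.length)

def pvCol (board : List (List String)) (k : Nat) : List String :=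
  (pvGrid board).map (fun row => row.getD k "")

theorem pvGrid_row_len (board : List (List String)) (hpre : Pre_check board) :
    ∀ r ∈ pvGrid board, r.length = board.length := by
  intro r hr
  obtain ⟨row, hrow, hres⟩ := List.mem_map.mp hr
  have := hpre row hrow
  rw [← hres, List.length_take]
  omega

-- one cell read through Python indexing = one cell of the proof-side column
theorem pvEntry (board : List (List String)) (hpre : Pre_check board)
    (p k : Nat) (hp : p < board.length) (hk : k < board.length) :
    PySem.List.pyGetD (PySem.List.pyGetD board (p : Int) []) (k : Int) ""
      = (pvCol board k).getD p "" := by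
  have hclen : (pvCol board k).length = board.length := by simp [pvCol, pvGrid]
  have hrowmem : board.getD p [] ∈ board := by
    rw [List.getD_eq_getElem _ _ hp]; exact List.getElem_mem hp
  have hrow : board.length ≤ (board.getD p []).length := hpre _ hrowmem
  have hrow' : board.length ≤ (board[p]'hp).length := by
    rw [← List.getD_eq_getElem board [] hp]; exact hrow
  simp only [PySem.List.pyGetD_natCast]
  rw [List.getD_eq_getElem _ _ (show p < (pvCol board k).length by rw [hclen]; exact hp)]
  unfold pvCol pvGrid
  rw [List.getElem_map, List.getElem_map]
  rw [List.getD_eq_getElem _ _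
        (show k < ((board[p]'(by simpa using hp)).take board.length).length by
          rw [List.length_take]; omega),
      List.getD_eq_getElem _ _ (lt_of_lt_of_le hk hrow)]
  rw [List.getElem_take]
  congr 1
  rw [List.getD_eq_getElem _ _ hp]

theorem pvInner_to_range (read : Int → String) (N : Nat) (s : Int × Int) :
    (PySem.List.pyRange 1 (N : Int) 1).foldl
      (fun (s : Int × Int) j =>
        let cnt : Int := if read j == read (j-1) then s.1 + 1 else 1
        (cnt, if cnt > s.2 then cnt else s.2)) s
    = (List.range (N - 1)).foldl
        (fun (s : Int × Int) (m : Nat) => pvStep (read (m : Int)) (read ((m : Int)+1)) s) s := by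
  rw [PySem.List.pyRange_one]
  have h1 : ((N:Int) - 1).toNat = N - 1 := by omega
  rw [h1, List.foldl_map]
  refine PySem.List.foldl_congr_mem _ _ _ _ ?_
  intro acc m _
  have e1 : (1:Int) + (m:Int) - 1 = (m:Int) := by ring
  have e2 : (1:Int) + (m:Int) = (m:Int) + 1 := by ring
  rw [e1, e2]
  rfl

theorem pvRowPart (board : List (List String)) (hpre : Pre_check board)
    (k : Nat) (hk : k < board.length) (ans : Int) (h1 : 1 ≤ ans) :
    ((List.range (board.length - 1)).foldl
      (fun (s : Int × Int) (m : Nat) =>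
        pvStep (PySem.List.pyGetD (PySem.List.pyGetD board (k : Int) []) (m : Int) "")
               (PySem.List.pyGetD (PySem.List.pyGetD board (k : Int) []) ((m : Int)+1) "") s)
      (1, ans)).2
    = max ans (pvLR ((board.getD k []).take board.length)) := by
  have hrowmem : board.getD k [] ∈ board := by
    rw [List.getD_eq_getElem _ _ hk]; exact List.getElem_mem hk
  have hrow : board.length ≤ (board.getD k []).length := hpre _ hrowmem
  have htlen : ((board.getD k []).take board.length).length = board.length := by
    rw [List.length_take]; omega
  have hfold : (List.range (board.length - 1)).foldl
      (fun (s : Int × Int) (m : Nat) =>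
        pvStep (PySem.List.pyGetD (PySem.List.pyGetD board (k : Int) []) (m : Int) "")
               (PySem.List.pyGetD (PySem.List.pyGetD board (k : Int) []) ((m : Int)+1) "") s)
      (1, ans)
    = (List.range (((board.getD k []).take board.length).length - 1)).foldl
        (fun (s : Int × Int) (m : Nat) =>
          pvStep (((board.getD k []).take board.length).getD m "")
                 (((board.getD k []).take board.length).getD (m+1) "") s) (1, ans) := by
    rw [htlen]
    refine PySem.List.foldl_congr_mem _ _ _ _ ?_
    intro acc m hm
    have hmlt : m < board.length - 1 := List.mem_range.mp hm
    have hr : ∀ (p : Nat), p < board.length →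
        PySem.List.pyGetD (PySem.List.pyGetD board (k : Int) []) (p : Int) ""
          = ((board.getD k []).take board.length).getD p "" := by
      intro p hp
      simp only [PySem.List.pyGetD_natCast]
      rw [List.getD_eq_getElem _ _ (lt_of_lt_of_le hp hrow),
          List.getD_eq_getElem _ _ (show p < ((board.getD k []).take board.length).length by
            rw [htlen]; exact hp)]
      exact (List.getElem_take).symm
    have e1 : ((m : Int) + 1) = (((m+1 : Nat)) : Int) := by push_cast; ring
    rw [e1, hr m (by omega), hr (m+1) (by omega)]
  rw [hfold, pvLineA _ ans h1]

theorem pvColPart (board : List (List String)) (hpre : Pre_check board)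
    (k : Nat) (hk : k < board.length) (ans : Int) (h1 : 1 ≤ ans) :
    ((List.range (board.length - 1)).foldl
      (fun (s : Int × Int) (m : Nat) =>
        pvStep (PySem.List.pyGetD (PySem.List.pyGetD board (m : Int) []) (k : Int) "")
               (PySem.List.pyGetD (PySem.List.pyGetD board ((m : Int)+1) []) (k : Int) "") s)
      (1, ans)).2
    = max ans (pvLR (pvCol board k)) := by
  have hclen : (pvCol board k).length = board.length := by simp [pvCol, pvGrid]
  have hfold : (List.range (board.length - 1)).foldl
      (fun (s : Int × Int) (m : Nat) =>
        pvStep (PySem.List.pyGetD (PySem.List.pyGetD board (m : Int) []) (k : Int) "")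
               (PySem.List.pyGetD (PySem.List.pyGetD board ((m : Int)+1) []) (k : Int) "") s)
      (1, ans)
    = (List.range ((pvCol board k).length - 1)).foldl
        (fun (s : Int × Int) (m : Nat) =>
          pvStep ((pvCol board k).getD m "") ((pvCol board k).getD (m+1) "") s) (1, ans) := by
    rw [hclen]
    refine PySem.List.foldl_congr_mem _ _ _ _ ?_
    intro acc m hm
    have hmlt : m < board.length - 1 := List.mem_range.mp hm
    have e1 : ((m : Int) + 1) = (((m+1 : Nat)) : Int) := by push_cast; ring
    rw [e1, pvEntry board hpre m k (by omega) hk, pvEntry board hpre (m+1) k (by omega) hk]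
  rw [hfold, pvLineA _ ans h1]

theorem pvCheck_eq (board : List (List String)) (hpre : Pre_check board) :
    check board
      = (List.range board.length).foldl
          (fun ans k => max (max ans (pvLR ((board.getD k []).take board.length)))
                            (pvLR (pvCol board k))) 1 := by
  unfold check
  simp only [PySem.List.pyRange_zero_nat]
  rw [List.foldl_map]
  refine pvFoldl_congr_inv _ _ _ (fun a => 1 ≤ a) 1 (le_refl _) ?_
  intro ans k h1 hk
  have klt : k < board.length := List.mem_range.mp hk
  have hbody : (fun (ans : Int) (i : Int) =>
      let s1 := (PySem.List.pyRange 1 (board.length : Int) 1).foldl (fun (s : Int × Int) j =>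
        let cnt : Int := if PySem.List.pyGetD (PySem.List.pyGetD board i []) j "" ==
                            PySem.List.pyGetD (PySem.List.pyGetD board i []) (j-1) ""
                         then s.1 + 1 else 1
        (cnt, if cnt > s.2 then cnt else s.2)) (1, ans)
      let s2 := (PySem.List.pyRange 1 (board.length : Int) 1).foldl (fun (s : Int × Int) j =>
        let cnt : Int := if PySem.List.pyGetD (PySem.List.pyGetD board j []) i "" ==
                            PySem.List.pyGetD (PySem.List.pyGetD board (j-1) []) i ""
                         then s.1 + 1 else 1
        (cnt, if cnt > s.2 then cnt else s.2)) (1, s1.2)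
      s2.2) ans (k : Int)
      = max (max ans (pvLR ((board.getD k []).take board.length))) (pvLR (pvCol board k)) := by
    simp only
    rw [pvInner_to_range (fun j => PySem.List.pyGetD (PySem.List.pyGetD board (k : Int) []) j "")
          board.length (1, ans)]
    rw [pvRowPart board hpre k klt ans h1]
    rw [pvInner_to_range (fun j => PySem.List.pyGetD (PySem.List.pyGetD board j []) (k : Int) "")
          board.length (1, max ans (pvLR ((board.getD k []).take board.length)))]
    rw [pvColPart board hpre k klt _ (le_trans h1 (le_max_left _ _))]
  exact ⟨hbody, le_trans h1 (le_trans (le_max_left _ _) (le_max_left _ _))⟩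

-- ===== B-side reduction: breakpoints and gaps =====

-- breakpoint positions of a line, enumerated from s (proof-side name for B's comprehension)
def pvBreaks (line : List String) (s : Int) : List Int :=
  ((PySem.List.enumerate (line.zip (line.drop 1)) s).filter
      (fun p => !(p.2.1 == p.2.2))).map (fun p => p.1 + 1)

-- the full cut list [s] ++ breaks ++ [s + len]
def pvCutsFull (line : List String) (s : Int) : List Int :=
  s :: pvBreaks line s ++ [s + (line.length : Int)]

def pvGapFold (cuts : List Int) (best : Int) : Int :=
  (cuts.zip (cuts.drop 1)).foldl (fun best p => if p.2 - p.1 > best then p.2 - p.1 else best) best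

theorem pvGapFold_cons_cons (a b : Int) (r : List Int) (best : Int) :
    pvGapFold (a :: b :: r) best = pvGapFold (b :: r) (max best (b - a)) := by
  unfold pvGapFold
  simp only [List.drop_succ_cons, List.drop_zero, List.zip_cons_cons, List.foldl_cons]
  congr 1
  split <;> omega

theorem pvBreaks_cons (x : String) (ys : List String) (s : Int) :
    pvBreaks (x :: ys) s =
      if (ys.dropWhile (fun y => y == x)).isEmpty then ([] : List Int)
      else (s + ((ys.takeWhile (fun y => y == x)).length : Int) + 1)
             :: pvBreaks (ys.dropWhile (fun y => y == x))
                  (s + ((ys.takeWhile (fun y => y == x)).length : Int) + 1) := by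
  induction ys generalizing x s with
  | nil => simp [pvBreaks]
  | cons y t ih =>
    by_cases h : (y == x) = true
    · have hyx : y = x := eq_of_beq h
      have hxy : (x == y) = true := by rw [hyx]; simp
      have hstep : pvBreaks (x :: y :: t) s = pvBreaks (y :: t) (s + 1) := by
        unfold pvBreaks
        simp only [List.drop_succ_cons, List.drop_zero, List.zip_cons_cons,
          PySem.List.enumerate_cons, List.filter_cons, hxy, Bool.not_true,
          Bool.false_eq_true, if_false]
      rw [hyx] at hstep
      rw [hyx, hstep, ih x (s+1)]
      rw [List.dropWhile_cons_of_pos (by simp), List.takeWhile_cons_of_pos (by simp)]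
      have harith : s + 1 + ((t.takeWhile (fun z => z == x)).length : Int) + 1
          = s + (((x :: t.takeWhile (fun z => z == x)).length : Nat) : Int) + 1 := by
        simp only [List.length_cons]; push_cast; ring
      rw [harith]
    · have hxy : (x == y) = false := by
        have hne2 : ¬ x = y := fun he => h (by rw [he]; simp)
        exact beq_eq_false_iff_ne.mpr hne2
      have hstep : pvBreaks (x :: y :: t) s = (s + 1) :: pvBreaks (y :: t) (s + 1) := by
        unfold pvBreaks
        simp only [List.drop_succ_cons, List.drop_zero, List.zip_cons_cons,
          PySem.List.enumerate_cons, List.filter_cons, hxy, Bool.not_false, if_true,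
          List.map_cons]
      rw [hstep]
      rw [List.dropWhile_cons_of_neg (by simpa using h), List.takeWhile_cons_of_neg (by simpa using h)]
      simp

theorem pvGapFold_cutsFull (line : List String) (hne : line ≠ []) (s best : Int) :
    pvGapFold (pvCutsFull line s) best = max best (pvLR line) := by
  induction line using pvLR.induct generalizing s best with
  | case1 => exact absurd rfl hne
  | case2 x ys ih =>
    have hlen : (ys.takeWhile (fun y => y == x)).length
        + (ys.dropWhile (fun y => y == x)).length = ys.length := by
      conv_rhs => rw [← List.takeWhile_append_dropWhile (p := fun y => y == x) (l := ys)]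
      rw [List.length_append]
    rw [pvCutsFull, pvBreaks_cons]
    by_cases hd : (ys.dropWhile (fun y => y == x)).isEmpty
    · have hdnil : ys.dropWhile (fun y => y == x) = [] := List.isEmpty_iff.mp hd
      have htl : (ys.takeWhile (fun y => y == x)).length = ys.length := by
        rw [hdnil] at hlen; simpa using hlen
      simp only [hd, if_true, List.singleton_append]
      rw [pvGapFold_cons_cons]
      unfold pvGapFold
      simp only [List.drop_succ_cons, List.drop_nil, List.zip_nil_right, List.foldl_nil]
      rw [pvLR, hdnil, htl]
      simp only [pvLR, List.length_cons]
      push_cast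
      omega
    · have hdne : ys.dropWhile (fun y => y == x) ≠ [] := by
        simpa [List.isEmpty_iff] using hd
      simp only [hd, if_false, Bool.false_eq_true]
      set t : Int := ((ys.takeWhile (fun y => y == x)).length : Int) with ht
      set d := ys.dropWhile (fun y => y == x) with hdd
      have hend : s + ((x :: ys).length : Int) = (s + t + 1) + (d.length : Int) := by
        simp only [List.length_cons]
        push_cast
        omega
      rw [hend]
      simp only [List.cons_append]
      rw [pvGapFold_cons_cons]
      rw [show ((s + t + 1) :: (pvBreaks d (s + t + 1) ++ [s + t + 1 + (d.length : Int)]))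
            = pvCutsFull d (s + t + 1) from rfl]
      have hrec := ih hdne (s + t + 1) (max best (s + t + 1 - s))
      rw [hrec]
      rw [pvLR]
      have h0 : (0:Int) ≤ t := by rw [ht]; positivity
      have hL := pvLR_nonneg d
      rw [← hdd, ← ht]
      omega

-- B's per-line fold body computes max best (pvLR line) for nonempty lines
theorem pvAltBody (line : List String) (hne : line ≠ []) (best : Int) :
    (fun (best : Int) (line : List String) =>
      let cuts : List Int :=
        0 :: ((PySem.List.enumerate (line.zip (PySem.List.slice line (some 1) none)) 0).filter
                (fun p => !(p.2.1 == p.2.2))).map (fun p => p.1 + 1)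
          ++ [(line.length : Int)]
      (cuts.zip (PySem.List.slice cuts (some 1) none)).foldl
        (fun best p => if p.2 - p.1 > best then p.2 - p.1 else best) best) best line
    = max best (pvLR line) := by
  have hs : PySem.List.slice line (some 1) none = line.drop 1 := by
    rw [PySem.List.slice_from_one]
    exact List.drop_one.symm
  have hs2 : ∀ (c : List Int), PySem.List.slice c (some 1) none = c.drop 1 := by
    intro c
    rw [PySem.List.slice_from_one]
    exact List.drop_one.symm
  simp only [hs, hs2]
  have hgap := pvGapFold_cutsFull line hne 0 best
  unfold pvGapFold pvCutsFull pvBreaks at hgap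
  have hz : (0 : Int) + (line.length : Int) = (line.length : Int) := by ring
  rw [hz] at hgap
  exact hgap

theorem pvCheckAlt_eq (board : List (List String)) (hpre : Pre_check board) :
    check_alt board
      = (List.range board.length).foldl (fun b k => max b (pvLR (pvCol board k)))
          ((pvGrid board).foldl (fun b row => max b (pvLR row)) 1) := by
  unfold check_alt
  simp only [PySem.List.slice_to_natCast]
  have hg : board.map (fun row => row.take board.length) = pvGrid board := rfl
  rw [hg]
  have hcols : (PySem.List.pyRange 0 (board.length : Int) 1).map (fun i =>
      (PySem.List.pyRange 0 (board.length : Int) 1).map (fun j =>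
        PySem.List.pyGetD (PySem.List.pyGetD board j []) i ""))
      = (List.range board.length).map (fun k => pvCol board k) := by
    rw [PySem.List.pyRange_zero_nat, List.map_map]
    refine List.map_congr_left ?_
    intro k hk
    have hklt : k < board.length := List.mem_range.mp hk
    simp only [Function.comp]
    rw [List.map_map]
    have hclen : (pvCol board k).length = board.length := by simp [pvCol, pvGrid]
    refine List.ext_getElem (by simp [hclen]) ?_
    intro p hp1 hp2
    simp only [List.getElem_map, List.getElem_range, Function.comp]
    have hplt : p < board.length := by simpa using hp1
    rw [← List.getD_eq_getElem (pvCol board k) "" hp2]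
    exact pvEntry board hpre p k hplt hklt
  rw [hcols]
  have hstep : (pvGrid board ++ (List.range board.length).map (fun k => pvCol board k)).foldl
      (fun (best : Int) (line : List String) =>
        let cuts : List Int :=
          0 :: ((PySem.List.enumerate (line.zip (PySem.List.slice line (some 1) none)) 0).filter
                  (fun p => !(p.2.1 == p.2.2))).map (fun p => p.1 + 1)
            ++ [(line.length : Int)]
        (cuts.zip (PySem.List.slice cuts (some 1) none)).foldl
          (fun best p => if p.2 - p.1 > best then p.2 - p.1 else best) best) 1
    = (pvGrid board ++ (List.range board.length).map (fun k => pvCol board k)).foldl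
        (fun (b : Int) (line : List String) => max b (pvLR line)) 1 := by
    refine PySem.List.foldl_congr_mem _ _ _ _ ?_
    intro acc line hmem
    have hne : line ≠ [] := by
      rcases List.mem_append.mp hmem with hmem | hmem
      · have hlen := pvGrid_row_len board hpre line hmem
        have hpos : 0 < board.length := by
          have : 0 < (pvGrid board).length := List.length_pos_of_mem hmem
          simpa [pvGrid] using this
        intro he
        rw [he] at hlen
        simp at hlen
        omega
      · obtain ⟨k, hk, hres⟩ := List.mem_map.mp hmem
        have hklt : k < board.length := List.mem_range.mp hk
        have hclen : line.length = board.length := by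
          rw [← hres]; simp [pvCol, pvGrid]
        intro he
        rw [he] at hclen
        simp at hclen
        omega
    exact pvAltBody line hne acc
  rw [hstep, List.foldl_append, List.foldl_map]
-- ===== VERDICT (by name: the statement is the Claim_ definition above) =====
theorem check_spec : Claim_equal_check := by
  intro board hdom hpre
  unfold Spec_check
  rw [pvCheck_eq board hpre, pvCheckAlt_eq board hpre, pvFoldMax_interleave]
  congr 1
  unfold pvGrid
  rw [List.foldl_map]
  exact pvFoldl_range_getD board
    (fun b row => max b (pvLR (row.take board.length))) [] 1
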